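-- pv_equiv track=rewrite | github.com/Silvermoonsniper/Human_vision_cognitive_system | human_vision_cognitive_system/novel_functionality_implementation/stroop_interference_effect.py | visual_stimuli_processor
-- ===== SOURCE A (Python) =====
-- def visual_stimuli_processor(stroop_visual_stimuli,target_range):
--     aa = []
--     bb = []
--     # array to store matched and unmatched visual stimuli(match means if word matches its printed color)
--     correspond_stimuli = []
--     noncorrespond_stimuli = []
--     meaningless = []
--     flag = 1
--     for i in stroop_visual_stimuli:
--         for j in range(len(i)):
--             # read through the information of visual stimuli sequentially, acooridng to human vision mechanisim, we prefer read
--             # from left to right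
--
--             if i[j] != '_' and flag == 1:
--                 aa.append(i[j])
--             else:
--                 flag = 0
--                 if i[j] != '_':
--                     bb.append(i[j])
--         flag = 1
--         # check if they are matched
--         # case 1: if word meaning is exactly its printed color
--         # case 2: if word meaning has no relation to printed color, clean, dry etc.
--
--         if aa == bb:
--             correspond_stimuli.append(i)
--         # if not matched
--         else:
--             noncorrespond_stimuli.append(i)
--         if aa != bb and ''.join(aa) not in target_range:
--             correspond_stimuli.append(i)
--             meaningless.append(i)
--
--         # get rid of existing information in compared array aa and bb, which stores word and printed color for targeted visual stimuli
--
--         aa = []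
--         bb = []
--
--     return correspond_stimuli, noncorrespond_stimuli
-- ===== SOURCE B (Python) =====
-- def visual_stimuli_processor(stroop_visual_stimuli, target_range):
--     correspond, noncorrespond = [], []
--     for s in stroop_visual_stimuli:
--         word, _, rest = s.partition('_')
--         color = ''.join(c for c in rest if c != '_')
--         if word == color:
--             correspond.append(s)
--         else:
--             noncorrespond.append(s)
--             if word not in target_range:
--                 correspond.append(s)
--     return correspond, noncorrespond
-- ===== Notes on version B (the rewrite author's own statement) =====
-- stated objective: simpler
-- what changed: B drops A's per-character flag loop and the unused 'meaningless' list, parsing each stimulus with str.partition('_') and a filter to get word/color, then classifies directly (preserving A's double append when word != color and word is not in target_range).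
import Mathlib
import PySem

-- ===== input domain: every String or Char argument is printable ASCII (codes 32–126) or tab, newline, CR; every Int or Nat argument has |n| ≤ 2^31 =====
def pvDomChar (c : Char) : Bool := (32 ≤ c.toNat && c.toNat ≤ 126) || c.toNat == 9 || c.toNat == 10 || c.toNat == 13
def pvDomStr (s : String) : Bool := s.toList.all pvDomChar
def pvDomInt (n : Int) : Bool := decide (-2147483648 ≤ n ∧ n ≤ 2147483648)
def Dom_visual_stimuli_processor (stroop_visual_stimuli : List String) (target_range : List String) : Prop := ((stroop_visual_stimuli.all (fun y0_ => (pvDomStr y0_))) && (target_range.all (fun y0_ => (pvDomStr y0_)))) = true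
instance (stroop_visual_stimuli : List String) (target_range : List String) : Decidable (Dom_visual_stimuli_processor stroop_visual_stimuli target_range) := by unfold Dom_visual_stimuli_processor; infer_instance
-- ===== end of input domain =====

-- B replaces A's per-character flag loop by parsing each stimulus with partition/filter
-- (word = part before the first '_', color = rest without '_'); objective: simpler.

-- ===== PORT A =====
-- A's inner char loop: state (aa, bb, flag); branch order as in the Python.
def pvAStepChar (st : List Char × List Char × Bool) (c : Char) : List Char × List Char × Bool :=
  if c ≠ '_' ∧ st.2.2 then (st.1 ++ [c], st.2.1, st.2.2)
  else (st.1, if c ≠ '_' then st.2.1 ++ [c] else st.2.1, false)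

-- A's outer loop: state (correspond_stimuli, noncorrespond_stimuli, meaningless);
-- aa, bb are reset to [] and flag to 1 at the start of each stimulus, exactly as in A.
-- ''.join(aa), aa a list of single characters, is exactly String.ofList aa.
def pvAStep (target_range : List String) (st : List String × List String × List String)
    (i : String) : List String × List String × List String :=
  let r := i.toList.foldl pvAStepChar ([], [], true)
  let aa := r.1
  let bb := r.2.1
  let st1 := if aa = bb then (st.1 ++ [i], st.2.1, st.2.2) else (st.1, st.2.1 ++ [i], st.2.2)
  if aa ≠ bb ∧ String.ofList aa ∉ target_range then (st1.1 ++ [i], st1.2.1, st1.2.2 ++ [i]) else st1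

def visual_stimuli_processor (stroop_visual_stimuli : List String) (target_range : List String) : List String × List String :=
  let r := stroop_visual_stimuli.foldl (pvAStep target_range) ([], [], [])
  (r.1, r.2.1)

-- ===== PORT B =====
-- Source B's loop body: s.partition('_') is (takeWhile, '_', drop 1 ∘ dropWhile) on the char
-- list; the join-of-filtered-comprehension is List.filter.
def pvBStep (target_range : List String) (st : List String × List String) (s : String) :
    List String × List String :=
  let word := s.toList.takeWhile (· ≠ '_')
  let color := ((s.toList.dropWhile (· ≠ '_')).drop 1).filter (· ≠ '_')
  if word = color then (st.1 ++ [s], st.2)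
  else if String.ofList word ∈ target_range then (st.1, st.2 ++ [s])
  else (st.1 ++ [s], st.2 ++ [s])

def visual_stimuli_processor_alt (stroop_visual_stimuli : List String) (target_range : List String) : List String × List String :=
  stroop_visual_stimuli.foldl (pvBStep target_range) ([], [])

-- ===== PRECONDITION & SPEC =====
def Spec_visual_stimuli_processor (stroop_visual_stimuli : List String) (target_range : List String) (out : List String × List String) : Prop := out = visual_stimuli_processor_alt stroop_visual_stimuli target_range
instance (stroop_visual_stimuli : List String) (target_range : List String) (out : List String × List String) : Decidable (Spec_visual_stimuli_processor stroop_visual_stimuli target_range out) := by unfold Spec_visual_stimuli_processor; infer_instance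

-- ===== CLAIM (what is proved, stated in full; the proofs are below) =====
def Claim_equal_visual_stimuli_processor : Prop := ∀ (stroop_visual_stimuli : List String) (target_range : List String), Dom_visual_stimuli_processor stroop_visual_stimuli target_range → Spec_visual_stimuli_processor stroop_visual_stimuli target_range (visual_stimuli_processor stroop_visual_stimuli target_range)

-- ===== LEMMAS AND PROOFS =====
lemma pvAloop_false (cs : List Char) : ∀ (aa bb : List Char),
    cs.foldl pvAStepChar (aa, bb, false) = (aa, bb ++ cs.filter (· ≠ '_'), false) := by
  induction cs with
  | nil => simp
  | cons c cs ih =>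
    intro aa bb
    by_cases hc : c = '_' <;> simp [pvAStepChar, hc, ih]

lemma pvAloop_true (cs : List Char) : ∀ (aa bb : List Char),
    cs.foldl pvAStepChar (aa, bb, true) =
      (aa ++ cs.takeWhile (· ≠ '_'),
       bb ++ ((cs.dropWhile (· ≠ '_')).drop 1).filter (· ≠ '_'),
       cs.all (· ≠ '_')) := by
  induction cs with
  | nil => simp
  | cons c cs ih =>
    intro aa bb
    by_cases hc : c = '_'
    · simp [pvAStepChar, hc, pvAloop_false]
    · simp [pvAStepChar, hc, ih]

lemma pvStep_agree (target_range : List String) (c n m : List String) (s : String) :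
    ((pvAStep target_range (c, n, m) s).1, (pvAStep target_range (c, n, m) s).2.1)
      = pvBStep target_range (c, n) s := by
  simp only [pvAStep, pvAloop_true, List.nil_append, pvBStep, List.drop_one]
  split_ifs <;> simp_all

lemma pvFold_agree (target_range : List String) (l : List String) : ∀ (c n m : List String),
    ((l.foldl (pvAStep target_range) (c, n, m)).1,
     (l.foldl (pvAStep target_range) (c, n, m)).2.1)
      = l.foldl (pvBStep target_range) (c, n) := by
  induction l with
  | nil => intro c n m; rfl
  | cons s l ih =>
    intro c n m
    have h := pvStep_agree target_range c n m s
    simp only [List.foldl_cons]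
    rw [show pvBStep target_range (c, n) s
        = ((pvAStep target_range (c, n, m) s).1, (pvAStep target_range (c, n, m) s).2.1) from h.symm]
    exact ih _ _ _

-- ===== VERDICT (by name: the statement is the Claim_ definition above) =====
theorem visual_stimuli_processor_spec : Claim_equal_visual_stimuli_processor := by
  intro st tr _
  show _ = _
  simpa [visual_stimuli_processor, visual_stimuli_processor_alt] using pvFold_agree tr st [] [] []
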